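-- pv_equiv track=rewrite | github.com/benquick123/code-profiling | code/batch-2/dn6 - spet tviti/M-17030-1312.py | zadnji_tvit
-- ===== SOURCE A (Python) =====
-- def zadnji_tvit(tviti):
--     zadnji_tviti = {}
--     ime1 = " "
--     for tvit in tviti:
--         za_ime = tvit.split()
--         ime = za_ime[0]
--         ime = ime.split()
--         ime = list(map(lambda x: x[:-1], ime))
--         ime = ime.pop()
--         tvit = tvit.split(" ", 1)[1]
--         if ime != ime1:
--             zadnji_tviti[ime] = tvit
--         else:
--             del zadnji_tviti[ime]
--             zadnji_tviti[ime] = tvit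
--         ime1 = ime
--     return (zadnji_tviti)
-- ===== SOURCE B (Python) =====
-- def zadnji_tvit(tviti):
--     tviti = list(tviti)
--     # one reverse pass: the first time a name is seen (= its last tweet) wins
--     d = {}
--     for tvit in reversed(tviti):
--         d.setdefault(tvit.split()[0][:-1], tvit.split(" ", 1)[1])
--     # emit names in first-appearance order
--     out = {}
--     for tvit in tviti:
--         name = tvit.split()[0][:-1]
--         if name not in out:
--             out[name] = d[name]
--     return out
-- ===== Notes on version B (the rewrite author's own statement) =====
-- stated objective: alternative
-- what changed: B replaces A's forward overwrite-with-conditional-delete loop (and its split/re-split/map/pop name extraction) by a reverse first-seen setdefault pass plus a first-appearance emission pass with a direct split()[0][:-1] parse.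
import Mathlib
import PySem

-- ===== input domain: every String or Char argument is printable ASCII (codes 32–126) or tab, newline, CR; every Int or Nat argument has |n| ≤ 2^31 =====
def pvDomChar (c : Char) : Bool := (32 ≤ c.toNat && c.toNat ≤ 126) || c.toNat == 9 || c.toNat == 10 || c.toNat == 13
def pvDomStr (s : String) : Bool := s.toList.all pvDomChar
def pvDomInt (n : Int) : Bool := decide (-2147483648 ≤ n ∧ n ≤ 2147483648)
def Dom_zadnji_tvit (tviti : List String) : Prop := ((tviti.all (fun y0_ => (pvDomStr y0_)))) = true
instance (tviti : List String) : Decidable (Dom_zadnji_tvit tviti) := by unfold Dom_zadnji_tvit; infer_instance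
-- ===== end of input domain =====

-- B replaces A's forward overwrite-with-conditional-delete loop by a reverse first-seen
-- setdefault pass plus a first-appearance emission pass (objective: alternative; same cost).

-- ===== PORT A =====
-- loop body of A, transliterated step for step
def zadnjiStep (st : PySem.Dict String String × String) (tvit : String) :
    PySem.Dict String String × String :=
  let za_ime := PySem.Str.split₀ tvit
  let ime := (PySem.List.pyGet? za_ime 0).getD ""       -- za_ime[0]; IndexError excluded by Pre_
  let ime2 := PySem.Str.split₀ ime
  let ime3 := ime2.map (fun x => PySem.Str.slice x none (some (-1)))
  let ime4 := ((PySem.List.pop? ime3).map Prod.fst).getD ""   -- ime.pop(); IndexError excluded by Pre_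
  let tvit' := ((PySem.Str.splitMax? tvit " " 1).bind (fun l => PySem.List.pyGet? l 1)).getD ""  -- tvit.split(" ", 1)[1]; IndexError excluded by Pre_
  if ime4 ≠ st.2 then (st.1.insert ime4 tvit', ime4)
  else ((st.1.erase ime4).insert ime4 tvit', ime4)      -- del (the key is present here in Python) then insert

def zadnji_tvit (tviti : List String) : List (String × String) :=
  (tviti.foldl zadnjiStep (PySem.Dict.empty, " ")).1.items

-- ===== PORT B =====
-- name = tvit.split()[0][:-1]
def pvName (t : String) : String :=
  PySem.Str.slice ((PySem.List.pyGet? (PySem.Str.split₀ t) 0).getD "") none (some (-1))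
-- content = tvit.split(" ", 1)[1]
def pvContent (t : String) : String :=
  ((PySem.Str.splitMax? t " " 1).bind (fun l => PySem.List.pyGet? l 1)).getD ""

-- d = {}; for tvit in reversed(tviti): d.setdefault(name, content)
def pvLastDict (tviti : List String) : PySem.Dict String String :=
  tviti.reverse.foldl (fun d t => d.setdefault (pvName t) (pvContent t)) PySem.Dict.empty

def zadnji_tvit_alt (tviti : List String) : List (String × String) :=
  let d := pvLastDict tviti
  (tviti.foldl (fun out t =>
      let n := pvName t
      if out.contains n then out else out.insert n ((d.get? n).getD ""))   -- d[n]; n is always a key of d here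
    PySem.Dict.empty).items

-- ===== PRECONDITION & SPEC =====
-- "whenever a username repeats in two consecutive tweets, it must be the most recently
-- first-introduced username at that point" — then A's del+reinsert (move-to-end) is a no-op.
def pvNoReorder (ns : List String) : Prop :=
  ∀ j < ns.length - 1, ns.getD (j + 1) "" = ns.getD j "" →
    (PySem.Set.ofList (ns.take (j + 1))).getLast? = some (ns.getD (j + 1) "")

-- Pre_ excludes (a) tweets with no word or no space, where A (and B) raise IndexError, and
-- (b) lists where a consecutively-repeated username is not the most recently introduced one:
-- there A's del+reinsert moves that key to the end of the dict, an accidental insertion-order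
-- artefact (the key/value CONTENTS agree; B keeps first-appearance order).
def Pre_zadnji_tvit (tviti : List String) : Prop :=
  (∀ t ∈ tviti, PySem.Str.split₀ t ≠ [] ∧ PySem.Str.isIn " " t = true) ∧
  pvNoReorder (tviti.map pvName)

instance (tviti : List String) : Decidable (Pre_zadnji_tvit tviti) := by
  unfold Pre_zadnji_tvit pvNoReorder; infer_instance

def pvWitness_zadnji_tvit : List String := ["ana: prvi tvit", "bine: drugi tvit", "ana: tretji tvit"]

def Spec_zadnji_tvit (tviti : List String) (out : List (String × String)) : Prop := out = zadnji_tvit_alt tviti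
instance (tviti : List String) (out : List (String × String)) : Decidable (Spec_zadnji_tvit tviti out) := by unfold Spec_zadnji_tvit; infer_instance

-- ===== CLAIM (what is proved, stated in full; the proofs are below) =====
def Claim_equal_zadnji_tvit : Prop := ∀ (tviti : List String), Dom_zadnji_tvit tviti → Pre_zadnji_tvit tviti → Spec_zadnji_tvit tviti (zadnji_tvit tviti)

-- ===== LEMMAS AND PROOFS =====

-- value of the last pair with first component n (the canonical "last tweet" value)
def pvLastV (ps : List (String × String)) (n : String) : String :=
  ((ps.reverse.find? (fun p => p.1 == n)).getD ("", "")).2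

theorem pyget_zero_cons {α : Type} (x : α) (xs : List α) :
    PySem.List.pyGet? (x :: xs) 0 = some x := by
  simp [PySem.List.pyGet?, PySem.List.pyIdx?]

theorem pop_singleton {α : Type} (x : α) :
    PySem.List.pop? [x] = some (x, []) := by
  simp [PySem.List.pop?, PySem.List.pyIdx?]

-- every token produced by split() is nonempty and whitespace-free
theorem split0_go_mem (s : List Char) : ∀ (cur : List Char) (acc : List (List Char)),
    (∀ c ∈ cur, PySem.Chars.isspace c = false) →
    ∀ t ∈ PySem.Chars.split₀.go s cur acc,
      t ∈ acc.reverse ∨ (t ≠ [] ∧ ∀ c ∈ t, PySem.Chars.isspace c = false) := by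
  induction s with
  | nil =>
    intro cur acc hcur t ht
    simp only [PySem.Chars.split₀.go] at ht
    by_cases hc : cur.isEmpty
    · simp [hc] at ht; exact Or.inl (by simpa using ht)
    · simp only [hc, List.reverse_cons] at ht
      rcases List.mem_append.mp ht with h | h
      · exact Or.inl h
      · right
        have ht' : t = cur.reverse := by simpa using h
        subst ht'
        constructor
        · simp only [ne_eq, List.reverse_eq_nil_iff]
          intro h'; subst h'; simp at hc
        · intro c hcmem; exact hcur c (List.mem_reverse.mp hcmem)
  | cons c rest ih =>
    intro cur acc hcur t ht
    simp only [PySem.Chars.split₀.go] at ht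
    by_cases hsp : PySem.Chars.isspace c
    · simp only [hsp, if_true] at ht
      by_cases hc : cur.isEmpty
      · simp only [hc, if_true] at ht
        exact ih [] acc (by simp) t ht
      · simp only [hc] at ht
        rcases ih [] (cur.reverse :: acc) (by simp) t ht with h | h
        · rw [List.reverse_cons] at h
          rcases List.mem_append.mp h with h' | h'
          · exact Or.inl h'
          · right
            have ht' : t = cur.reverse := by simpa using h'
            subst ht'
            refine ⟨?_, fun c hcmem => hcur c (List.mem_reverse.mp hcmem)⟩
            simp only [ne_eq, List.reverse_eq_nil_iff]
            intro h'; subst h'; simp at hc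
        · exact Or.inr h
    · simp only [hsp] at ht
      refine ih (c :: cur) acc ?_ t ht
      intro x hx
      rcases List.mem_cons.mp hx with h | h
      · subst h; simpa using hsp
      · exact hcur x h

theorem split0_go_nospace (s : List Char) : ∀ (cur : List Char) (acc : List (List Char)),
    (∀ c ∈ s, PySem.Chars.isspace c = false) →
    PySem.Chars.split₀.go s cur acc = PySem.Chars.split₀.go [] (s.reverse ++ cur) acc := by
  induction s with
  | nil => intro cur acc _; simp
  | cons c rest ih =>
    intro cur acc h
    have hc : PySem.Chars.isspace c = false := h c (by simp)
    conv_lhs => rw [PySem.Chars.split₀.go]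
    simp only [hc, Bool.false_eq_true, if_false]
    rw [ih (c :: cur) acc (fun x hx => h x (by simp [hx]))]
    congr 1
    simp

theorem split0_token (cs : List Char) (h0 : cs ≠ [])
    (h : ∀ c ∈ cs, PySem.Chars.isspace c = false) :
    PySem.Chars.split₀ cs = [cs] := by
  unfold PySem.Chars.split₀
  rw [split0_go_nospace cs [] [] h]
  simp only [PySem.Chars.split₀.go, List.append_nil]
  have hne : cs.reverse.isEmpty = false := by
    cases cs with
    | nil => exact absurd rfl h0
    | cons a l => simp
  simp [hne]

theorem split0_mem (s t : List Char) (ht : t ∈ PySem.Chars.split₀ s) :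
    t ≠ [] ∧ ∀ c ∈ t, PySem.Chars.isspace c = false := by
  have := split0_go_mem s [] [] (by simp) t ht
  simpa using this

theorem head_token (t t0 : String) (rest : List String)
    (h : PySem.Str.split₀ t = t0 :: rest) :
    t0.toList ≠ [] ∧ ∀ c ∈ t0.toList, PySem.Chars.isspace c = false := by
  have hmem : t0.toList ∈ (PySem.Str.split₀ t).map String.toList := by
    rw [h]; simp
  rw [PySem.Str.split₀_map_toList] at hmem
  exact split0_mem _ _ hmem

theorem resplit (t0 : String) (h0 : t0.toList ≠ [])
    (h : ∀ c ∈ t0.toList, PySem.Chars.isspace c = false) :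
    PySem.Str.split₀ t0 = [t0] := by
  have hmap : (PySem.Str.split₀ t0).map String.toList = [t0.toList] := by
    rw [PySem.Str.split₀_map_toList, split0_token t0.toList h0 h]
  cases hsp : PySem.Str.split₀ t0 with
  | nil => rw [hsp] at hmap; simp at hmap
  | cons a l =>
    rw [hsp] at hmap
    simp only [List.map_cons, List.cons.injEq, List.map_eq_nil_iff] at hmap
    obtain ⟨ha, hl⟩ := hmap
    rw [String.toList_inj.mp ha, hl]

theorem name_of_head (t t0 : String) (rest : List String)
    (h : PySem.Str.split₀ t = t0 :: rest) :
    pvName t = PySem.Str.slice t0 none (some (-1)) := by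
  unfold pvName
  rw [h, pyget_zero_cons, Option.getD_some]

theorem name_ne_blank (t : String) (hs : PySem.Str.split₀ t ≠ []) : pvName t ≠ " " := by
  obtain ⟨t0, rest, h⟩ := List.exists_cons_of_ne_nil hs
  obtain ⟨h0, hsp⟩ := head_token t t0 rest h
  rw [name_of_head t t0 rest h]
  intro he
  have htl := congrArg String.toList he
  rw [PySem.Str.slice_to_neg_one] at htl
  have hmem : ' ' ∈ t0.toList :=
    List.mem_of_mem_dropLast (by rw [htl]; simp [show (" ").toList = [' '] from rfl])
  have hfalse : PySem.Chars.isspace ' ' = false := hsp ' ' hmem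
  exact absurd hfalse (by decide)

-- A's loop body in normal form (the name expression resolved to pvName)
theorem step_eq' (st : PySem.Dict String String × String) (t : String)
    (hs : PySem.Str.split₀ t ≠ []) :
    zadnjiStep st t =
      if pvName t ≠ st.2 then (st.1.insert (pvName t) (pvContent t), pvName t)
      else ((st.1.erase (pvName t)).insert (pvName t) (pvContent t), pvName t) := by
  obtain ⟨t0, rest, h⟩ := List.exists_cons_of_ne_nil hs
  obtain ⟨h0, hsp⟩ := head_token t t0 rest h
  have hn := name_of_head t t0 rest h
  unfold zadnjiStep
  simp only [h, pyget_zero_cons, Option.getD_some]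
  rw [resplit t0 h0 hsp]
  simp only [List.map_cons, List.map_nil, pop_singleton, Option.map_some, Option.getD_some, ← hn]
  rfl

theorem items_erase (d : PySem.Dict String String) (k : String) :
    (d.erase k).items = d.items.filter (fun p => !(p.1 == k)) := rfl

theorem contains_erase_self (d : PySem.Dict String String) (k : String) :
    (d.erase k).contains k = false := by
  show ((d.items.filter (fun p => !(p.1 == k))).any (fun p => p.1 == k)) = false
  rw [List.any_eq_false]
  intro p hp
  have h2 := (List.mem_filter.mp hp).2
  simpa using h2

theorem lastV_snoc (qs : List (String × String)) (p : String × String) (n : String) :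
    pvLastV (qs ++ [p]) n = if p.1 = n then p.2 else pvLastV qs n := by
  unfold pvLastV
  rw [List.reverse_append, List.reverse_singleton, List.singleton_append]
  by_cases hpn : p.1 = n
  · rw [List.find?_cons_of_pos (by simp [hpn])]; simp [hpn]
  · rw [List.find?_cons_of_neg (by simp [hpn])]; simp [hpn]

theorem noreorder_prefix {ns : List String} {b : String}
    (h : pvNoReorder (ns ++ [b])) : pvNoReorder ns := by
  intro j hj heq
  have hlen : (ns ++ [b]).length = ns.length + 1 := by simp
  have hj' : j < (ns ++ [b]).length - 1 := by omega
  have e1 : (ns ++ [b]).getD (j + 1) "" = ns.getD (j + 1) "" :=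
    List.getD_append _ _ _ _ (by omega)
  have e2 : (ns ++ [b]).getD j "" = ns.getD j "" :=
    List.getD_append _ _ _ _ (by omega)
  have e3 : (ns ++ [b]).take (j + 1) = ns.take (j + 1) :=
    List.take_append_of_le_length (by omega)
  have := h j hj' (by rw [e1, e2]; exact heq)
  rwa [e3, e1] at this

theorem noreorder_last {ns : List String} {b : String}
    (h : pvNoReorder (ns ++ [b])) (hne : ns ≠ []) (hb : b = ns.getLastD " ") :
    (PySem.Set.ofList ns).getLast? = some b := by
  have hlen : 0 < ns.length := List.length_pos_iff.mpr hne
  have hlen2 : (ns ++ [b]).length = ns.length + 1 := by simp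
  have hidx : ns.length - 1 + 1 = ns.length := by omega
  have e1 : (ns ++ [b]).getD (ns.length - 1 + 1) "" = b := by
    rw [hidx]
    simp [List.getD]
  have egl : ns.getD (ns.length - 1) "" = b := by
    rw [hb, List.getLastD_eq_getLast?, List.getLast?_eq_getElem?]
    have h2 : ns[ns.length - 1]? = some ns[ns.length - 1] :=
      List.getElem?_eq_getElem (by omega)
    simp [List.getD, h2]
  have e2 : (ns ++ [b]).getD (ns.length - 1) "" = b := by
    rw [List.getD_append _ _ _ _ (by omega)]; exact egl
  have e3 := h (ns.length - 1) (by omega) (by rw [e1, e2])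
  rw [e1] at e3
  rwa [hidx, List.take_left] at e3

-- A's whole loop: under Pre_'s conditions the dict holds the names in first-appearance
-- order with each name's last content, and the second state component is the last name
set_option maxHeartbeats 1600000 in
theorem A_fold (tviti : List String) :
    (∀ t ∈ tviti, PySem.Str.split₀ t ≠ []) →
    pvNoReorder (tviti.map pvName) →
    ((tviti.foldl zadnjiStep (PySem.Dict.empty, " ")).1.items
      = (PySem.Set.ofList (tviti.map pvName)).map
          (fun n => (n, pvLastV (tviti.map (fun t => (pvName t, pvContent t))) n))
     ∧ (tviti.foldl zadnjiStep (PySem.Dict.empty, " ")).2 = (tviti.map pvName).getLastD " ") := by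
  induction tviti using List.reverseRecOn with
  | nil => exact fun _ _ => ⟨rfl, rfl⟩
  | append_singleton l t ih =>
    intro hp hmv
    have hmv2 : pvNoReorder (l.map pvName ++ [pvName t]) := by simpa using hmv
    obtain ⟨ih1, ih2⟩ := ih (fun x hx => hp x (by simp [hx])) (noreorder_prefix hmv2)
    rw [List.foldl_append, List.foldl_cons, List.foldl_nil]
    rw [step_eq' _ t (hp t (by simp)), ih2]
    have hkeys : (l.foldl zadnjiStep (PySem.Dict.empty, " ")).1.keys
        = PySem.Set.ofList (l.map pvName) := by
      have hk : (l.foldl zadnjiStep (PySem.Dict.empty, " ")).1.keys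
          = (l.foldl zadnjiStep (PySem.Dict.empty, " ")).1.items.map Prod.fst := rfl
      rw [hk, ih1, List.map_map]
      exact List.map_id _
    have hnames : (l ++ [t]).map pvName = l.map pvName ++ [pvName t] := by simp
    have hpairs : (l ++ [t]).map (fun t => (pvName t, pvContent t))
        = l.map (fun t => (pvName t, pvContent t)) ++ [(pvName t, pvContent t)] := by simp
    rw [hnames, hpairs, PySem.Set.ofList_append_singleton]
    by_cases hpn : pvName t = (l.map pvName).getLastD " "
    · -- consecutive repeat: A moves the key to the end; by pvNoReorder it already is the end
      have hlne : l ≠ [] := by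
        intro h0; subst h0
        exact name_ne_blank t (hp t (by simp)) (by simpa using hpn)
      have hnsne : l.map pvName ≠ [] := by simpa using hlne
      have hlast : (PySem.Set.ofList (l.map pvName)).getLast? = some (pvName t) :=
        noreorder_last hmv2 hnsne hpn
      obtain ⟨L, hL⟩ := List.getLast?_eq_some_iff.mp hlast
      have hnodup : (PySem.Set.ofList (l.map pvName)).Nodup := PySem.Set.nodup_ofList _
      have hnotL : pvName t ∉ L := by
        rw [hL, List.nodup_append] at hnodup
        exact fun hmem => hnodup.2.2 (pvName t) hmem (pvName t) (by simp) rfl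
      rw [if_neg (by simpa using hpn)]
      refine ⟨?_, by simp⟩
      rw [PySem.Dict.items_insert_of_not_contains _ _ (contains_erase_self _ _),
          items_erase, ih1,
          PySem.Set.add_of_mem (show pvName t ∈ PySem.Set.ofList (l.map pvName) from by rw [hL]; simp),
          hL, List.map_append, List.filter_append]
      have hfL : ((L.map (fun n => (n, pvLastV (l.map (fun t => (pvName t, pvContent t))) n))).filter
          (fun p => !(p.1 == pvName t)))
          = L.map (fun n => (n, pvLastV (l.map (fun t => (pvName t, pvContent t))) n)) := by
        rw [List.filter_eq_self]
        intro q hq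
        obtain ⟨m, hm, rfl⟩ := List.mem_map.mp hq
        simp only [Bool.not_eq_eq_eq_not, Bool.not_true, beq_eq_false_iff_ne, ne_eq]
        exact fun e => hnotL (e ▸ hm)
      rw [hfL,
          show (([pvName t].map (fun n => (n, pvLastV (l.map (fun t => (pvName t, pvContent t))) n))).filter
              (fun p => !(p.1 == pvName t))) = [] from by simp,
          List.append_nil, List.map_append]
      refine congrArg₂ (· ++ ·) ?_ ?_
      · apply List.map_congr_left
        intro m hm
        have hpn2 : pvName t ≠ m := fun e => hnotL (e ▸ hm)
        simp [lastV_snoc, hpn2]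
      · simp [lastV_snoc]
    · -- fresh or non-consecutive name: plain insert (overwrite in place or append)
      rw [if_pos (by simpa using hpn)]
      refine ⟨?_, by simp⟩
      by_cases hmem : pvName t ∈ PySem.Set.ofList (l.map pvName)
      · have hc : (l.foldl zadnjiStep (PySem.Dict.empty, " ")).1.contains (pvName t) = true := by
          rw [PySem.Dict.contains_eq_decide_mem_keys, hkeys]; simpa using hmem
        rw [PySem.Dict.items_insert_of_contains _ _ hc, ih1, List.map_map,
            PySem.Set.add_of_mem hmem]
        apply List.map_congr_left
        intro n _
        simp only [Function.comp_apply]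
        by_cases hpn2 : pvName t = n
        · subst hpn2; simp [lastV_snoc]
        · have hb : (n == pvName t) = false := by
            simp only [beq_eq_false_iff_ne, ne_eq]; exact fun e => hpn2 e.symm
          simp [hb, lastV_snoc, hpn2]
      · have hc : (l.foldl zadnjiStep (PySem.Dict.empty, " ")).1.contains (pvName t) = false := by
          rw [PySem.Dict.contains_eq_decide_mem_keys, hkeys]; simpa using hmem
        rw [PySem.Dict.items_insert_of_not_contains _ _ hc, ih1,
            PySem.Set.add_of_not_mem hmem, List.map_append]
        refine congrArg₂ (· ++ ·) ?_ ?_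
        · apply List.map_congr_left
          intro n hn
          have hpn2 : pvName t ≠ n := fun e => hmem (e ▸ hn)
          simp [lastV_snoc, hpn2]
        · simp [lastV_snoc]

theorem setdefault_fold_get? (ps : List (String × String)) :
    ∀ (d : PySem.Dict String String) (n : String),
    (ps.foldl (fun d p => d.setdefault p.1 p.2) d).get? n
    = (d.get? n).or ((ps.find? (fun p => p.1 == n)).map Prod.snd) := by
  induction ps with
  | nil => intro d n; simp
  | cons p ps ih =>
    intro d n
    simp only [List.foldl_cons]
    rw [ih]
    by_cases h : n = p.1
    · rw [h, PySem.Dict.get?_setdefault_self, List.find?_cons_of_pos (by simp)]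
      cases hd : d.get? p.1 <;> simp [Option.or]
    · rw [PySem.Dict.get?_setdefault_of_ne _ _ h]
      rw [List.find?_cons_of_neg (by simp only [beq_eq_false_iff_ne, ne_eq, Bool.not_eq_true]; exact fun e => h e.symm)]

theorem emit_fold_items (l : List String) (f g : String → String) :
    (l.foldl (fun out t => if out.contains (f t) then out else out.insert (f t) (g (f t)))
      (PySem.Dict.empty : PySem.Dict String String)).items
    = (PySem.Set.ofList (l.map f)).map (fun n => (n, g n)) := by
  induction l using List.reverseRecOn with
  | nil => rfl
  | append_singleton l t ih =>
    rw [List.foldl_append, List.foldl_cons, List.foldl_nil]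
    have hkeys : (l.foldl (fun out t => if out.contains (f t) then out else out.insert (f t) (g (f t)))
        (PySem.Dict.empty : PySem.Dict String String)).keys = PySem.Set.ofList (l.map f) := by
      have hk : (l.foldl (fun out t => if out.contains (f t) then out else out.insert (f t) (g (f t)))
          (PySem.Dict.empty : PySem.Dict String String)).keys
          = ((l.foldl (fun out t => if out.contains (f t) then out else out.insert (f t) (g (f t)))
          (PySem.Dict.empty : PySem.Dict String String)).items).map Prod.fst := rfl
      rw [hk, ih, List.map_map]
      exact List.map_id _
    rw [show (l ++ [t]).map f = l.map f ++ [f t] from by simp, PySem.Set.ofList_append_singleton]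
    by_cases hmem : f t ∈ PySem.Set.ofList (l.map f)
    · have hc : (l.foldl (fun out t => if out.contains (f t) then out else out.insert (f t) (g (f t)))
          (PySem.Dict.empty : PySem.Dict String String)).contains (f t) = true := by
        rw [PySem.Dict.contains_eq_decide_mem_keys, hkeys]; simpa using hmem
      rw [if_pos hc, ih, PySem.Set.add_of_mem hmem]
    · have hc : (l.foldl (fun out t => if out.contains (f t) then out else out.insert (f t) (g (f t)))
          (PySem.Dict.empty : PySem.Dict String String)).contains (f t) = false := by
        rw [PySem.Dict.contains_eq_decide_mem_keys, hkeys]; simpa using hmem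
      rw [if_neg (by rw [hc]; exact Bool.false_ne_true),
          PySem.Dict.items_insert_of_not_contains _ _ hc, ih,
          PySem.Set.add_of_not_mem hmem, List.map_append]
      rfl

theorem lookup_eq (ps : List (String × String)) (n : String) :
    (((ps.reverse).foldl (fun d p => d.setdefault p.1 p.2)
        (PySem.Dict.empty : PySem.Dict String String)).get? n).getD ""
    = pvLastV ps n := by
  rw [setdefault_fold_get?]
  unfold pvLastV
  cases h : ps.reverse.find? (fun p => p.1 == n) <;>
    simp [PySem.Dict.get?_empty, Option.or]

-- ===== VERDICT (by name: the statement is the Claim_ definition above) =====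
theorem zadnji_tvit_spec : Claim_equal_zadnji_tvit := by
  intro tviti _ hpre
  obtain ⟨hp, hmv⟩ := hpre
  show zadnji_tvit tviti = zadnji_tvit_alt tviti
  have hA := (A_fold tviti (fun t ht => (hp t ht).1) hmv).1
  have hD : pvLastDict tviti
      = ((tviti.map (fun t => (pvName t, pvContent t))).reverse).foldl
          (fun d p => d.setdefault p.1 p.2) PySem.Dict.empty := by
    unfold pvLastDict
    rw [← List.map_reverse]
    exact (List.foldl_map (f := fun t => (pvName t, pvContent t))
      (g := fun (d : PySem.Dict String String) (p : String × String) => d.setdefault p.1 p.2)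
      (l := tviti.reverse) (init := PySem.Dict.empty)).symm
  have hg : ∀ n, ((pvLastDict tviti).get? n).getD ""
      = pvLastV (tviti.map (fun t => (pvName t, pvContent t))) n := by
    intro n
    rw [hD]
    exact lookup_eq _ n
  have hB : zadnji_tvit_alt tviti
      = (PySem.Set.ofList (tviti.map pvName)).map
          (fun n => (n, ((pvLastDict tviti).get? n).getD "")) := by
    show (tviti.foldl (fun out t =>
        let n := pvName t
        if out.contains n then out else out.insert n (((pvLastDict tviti).get? n).getD ""))
      PySem.Dict.empty).items = _
    exact emit_fold_items tviti pvName (fun n => ((pvLastDict tviti).get? n).getD "")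
  unfold zadnji_tvit
  rw [hA, hB]
  apply List.map_congr_left
  intro n _
  rw [hg n]
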